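-- pv_equiv track=rewrite | github.com/j-carlos-perez/covering-arrays | analysis/exhaustive_seed_scan.py | expected_balanced_seed_count
-- ===== SOURCE A (Python) =====
-- import math
--
-- def choose(n, r):
--     return math.comb(n, r)
--
-- def expected_balanced_seed_count(k, v):
--     base = k // v
--     remainder = k % v
--     count = choose(v, remainder)
--     denom = 1
--     for i in range(v):
--         c = base + (1 if i < remainder else 0)
--         denom *= math.factorial(c)
--     count *= math.factorial(k) // denom
--     return count
-- ===== SOURCE B (Python) =====
-- import math
--
-- def expected_balanced_seed_count(k, v):
--     base = k // v
--     remainder = k % v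
--     count = math.comb(v, remainder)
--     remaining = k
--     for i in range(v):
--         c = base + (1 if i < remainder else 0)
--         count *= math.comb(remaining, c)
--         remaining -= c
--     return count
-- ===== Notes on version B (the rewrite author's own statement) =====
-- stated objective: alternative
-- what changed: B replaces A's factorial accumulation followed by one big division (count *= k!//prod(c_i!)) with a running product of binomial coefficients over a shrinking 'remaining' total, so no factorials and no division are ever computed.
import Mathlib
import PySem

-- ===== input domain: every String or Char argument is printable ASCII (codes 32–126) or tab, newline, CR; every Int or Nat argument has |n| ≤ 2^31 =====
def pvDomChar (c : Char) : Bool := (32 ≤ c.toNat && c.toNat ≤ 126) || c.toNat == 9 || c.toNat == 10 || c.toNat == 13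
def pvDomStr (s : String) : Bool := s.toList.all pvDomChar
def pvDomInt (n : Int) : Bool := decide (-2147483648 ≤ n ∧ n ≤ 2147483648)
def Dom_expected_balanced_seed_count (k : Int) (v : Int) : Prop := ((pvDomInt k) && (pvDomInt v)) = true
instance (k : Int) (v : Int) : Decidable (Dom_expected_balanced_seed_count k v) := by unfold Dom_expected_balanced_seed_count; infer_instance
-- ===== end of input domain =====

-- B replaces A's factorial accumulation and single big division by a running product of
-- binomial coefficients over a shrinking remaining total (alternative decomposition, same cost class).


-- ===== PORT A =====
-- math.comb(n, r), evaluable form (falling factorial over r!; Nat.choose's Pascal recursion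
-- is exponential to evaluate); equal to Nat.choose by Nat.choose_eq_descFactorial_div_factorial.
def pyComb (n r : ℕ) : ℕ := n.descFactorial r / r.factorial

-- math.comb / math.factorial are ported as Nat.choose / Nat.factorial on .toNat;
-- exact on Pre_ (0 ≤ k, 0 < v), where every argument Python feeds them is nonnegative.
def expected_balanced_seed_count (k : Int) (v : Int) : Int :=
  let base := PySem.Int.floordiv k v
  let remainder := PySem.Int.mod k v
  let count : Int := (pyComb v.toNat remainder.toNat : Int)
  let denom : Int := (PySem.List.pyRange 0 v 1).foldl
    (fun d i => d * (Nat.factorial (base + (if i < remainder then 1 else 0)).toNat : Int)) 1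
  count * PySem.Int.floordiv (Nat.factorial k.toNat : Int) denom

-- ===== PORT B =====
def expected_balanced_seed_count_alt (k : Int) (v : Int) : Int :=
  let base := PySem.Int.floordiv k v
  let remainder := PySem.Int.mod k v
  let st := (PySem.List.pyRange 0 v 1).foldl
    (fun (st : Int × Int) i =>
      let c := base + (if i < remainder then 1 else 0)
      (st.1 - c, st.2 * (pyComb st.1.toNat c.toNat : Int)))
    (k, (pyComb v.toNat remainder.toNat : Int))
  st.2

-- ===== PRECONDITION & SPEC =====
-- Pre_ excludes exactly the inputs where Python A raises: v = 0 (ZeroDivisionError) and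
-- v < 0 or k < 0 (math.comb / math.factorial ValueError on a negative argument).
def Pre_expected_balanced_seed_count (k : Int) (v : Int) : Prop := 0 ≤ k ∧ 0 < v
instance (k : Int) (v : Int) : Decidable (Pre_expected_balanced_seed_count k v) := by
  unfold Pre_expected_balanced_seed_count; infer_instance
def pvWitness_expected_balanced_seed_count : Int × Int := (7, 3)

def Spec_expected_balanced_seed_count (k : Int) (v : Int) (out : Int) : Prop :=
  out = expected_balanced_seed_count_alt k v
instance (k : Int) (v : Int) (out : Int) : Decidable (Spec_expected_balanced_seed_count k v out) := by
  unfold Spec_expected_balanced_seed_count; infer_instance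

-- ===== CLAIM (what is proved, stated in full; the proofs are below) =====
def Claim_equal_expected_balanced_seed_count : Prop :=
  ∀ (k : Int) (v : Int), Dom_expected_balanced_seed_count k v →
    Pre_expected_balanced_seed_count k v →
    Spec_expected_balanced_seed_count k v (expected_balanced_seed_count k v)

-- ===== LEMMAS AND PROOFS =====

lemma pyComb_eq (n r : ℕ) : pyComb n r = n.choose r :=
  (Nat.choose_eq_descFactorial_div_factorial n r).symm

-- The list of group sizes: b+1 for the first r slots, b afterwards.
def pvCs (b r V : ℕ) : List ℕ := (List.range V).map (fun j => b + (if j < r then 1 else 0))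

lemma pvCs_sum (b r V : ℕ) : (pvCs b r V).sum = b * V + min r V := by
  induction V with
  | zero => simp [pvCs]
  | succ n ih =>
    rw [pvCs, List.range_succ, List.map_append, List.sum_append]
    rw [pvCs] at ih
    simp only [List.map_cons, List.map_nil, List.sum_cons, List.sum_nil]
    rw [ih, Nat.mul_succ]
    split_ifs with h <;> omega

-- B's running product of binomials on a list of group sizes, remaining total s.
def pvBp : ℕ → List ℕ → ℕ
  | _, [] => 1
  | s, c :: t => Nat.choose s c * pvBp (s - c) t

lemma pvBp_mul_prodFact (cs : List ℕ) :
    pvBp cs.sum cs * (cs.map Nat.factorial).prod = cs.sum.factorial := by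
  induction cs with
  | nil => simp [pvBp]
  | cons c t ih =>
    simp only [pvBp, List.sum_cons, List.map_cons, List.prod_cons, Nat.add_sub_cancel_left]
    calc Nat.choose (c + t.sum) c * pvBp t.sum t * (c.factorial * (t.map Nat.factorial).prod)
        = Nat.choose (c + t.sum) c * c.factorial * (pvBp t.sum t * (t.map Nat.factorial).prod) := by
          ring
      _ = Nat.choose (c + t.sum) c * c.factorial * t.sum.factorial := by rw [ih]
      _ = (c + t.sum).factorial := by
          have := Nat.choose_mul_factorial_mul_factorial (Nat.le_add_right c t.sum)
          simpa [Nat.add_sub_cancel_left] using this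

-- multiplicative fold with an Int accumulator is init * the Nat product
lemma pvFoldlMulCast (g : ℕ → ℕ) (l : List ℕ) (init : Int) :
    List.foldl (fun d j => d * ((g j : ℕ) : Int)) init l = init * (((l.map g).prod : ℕ) : Int) := by
  induction l generalizing init with
  | nil => simp
  | cons a t ih => simp [ih, mul_assoc]

-- B's fold on the index list, abstracted to group sizes g j, with remaining ≥ what is consumed
lemma pvBfold (g : ℕ → ℕ) (l : List ℕ) (s : ℕ) (acc : Int) (h : (l.map g).sum ≤ s) :
    List.foldl (fun (st : Int × Int) j =>
        (st.1 - ((g j : ℕ) : Int), st.2 * ((Nat.choose st.1.toNat (g j) : ℕ) : Int)))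
      (((s : ℕ) : Int), acc) l
    = (((s - (l.map g).sum : ℕ) : Int), acc * ((pvBp s (l.map g) : ℕ) : Int)) := by
  induction l generalizing s acc with
  | nil => simp [pvBp]
  | cons a t ih =>
    simp only [List.foldl_cons, List.map_cons, List.sum_cons] at h ⊢
    have ha : g a ≤ s := by omega
    have h1 : ((s : ℕ) : Int) - ((g a : ℕ) : Int) = (((s - g a : ℕ)) : Int) := by
      omega
    have h2 : ((s : ℕ) : Int).toNat = s := by omega
    rw [h1, h2, ih (s - g a) _ (by omega)]
    refine Prod.ext ?_ ?_
    · simp only; congr 1; omega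
    · simp only [pvBp, Nat.cast_mul]; ring

-- prods of factorials are positive
lemma pvProdFactPos (cs : List ℕ) : 0 < (cs.map Nat.factorial).prod := by
  apply List.prod_pos
  intro x hx
  rcases List.mem_map.mp hx with ⟨c, _, rfl⟩
  exact Nat.factorial_pos c

theorem expected_balanced_seed_count_spec : Claim_equal_expected_balanced_seed_count := by
  intro k v _ hpre
  obtain ⟨hk, hv⟩ := hpre
  unfold Spec_expected_balanced_seed_count
  unfold expected_balanced_seed_count expected_balanced_seed_count_alt
  simp only [pyComb_eq]
  -- name the Nat shadows
  obtain ⟨V, rfl⟩ : ∃ V : ℕ, v = (V : Int) := ⟨v.toNat, (Int.toNat_of_nonneg (le_of_lt hv)).symm⟩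
  obtain ⟨K, rfl⟩ : ∃ K : ℕ, k = (K : Int) := ⟨k.toNat, (Int.toNat_of_nonneg hk).symm⟩
  have hV : 0 < V := by exact_mod_cast hv
  set b : ℕ := K / V with hb
  set r : ℕ := K % V with hr
  have hfd : PySem.Int.floordiv (K : Int) (V : Int) = (b : Int) := PySem.Int.floordiv_natCast K V
  have hmd : PySem.Int.mod (K : Int) (V : Int) = (r : Int) := PySem.Int.mod_natCast K V
  have hrange : PySem.List.pyRange 0 (V : Int) 1 = (List.range V).map (fun j => (0 : Int) + (j : ℕ)) := by
    rw [PySem.List.pyRange_one]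
    simp
  set g : ℕ → ℕ := fun j => b + (if j < r then 1 else 0) with hg
  have hcs : (List.range V).map g = pvCs b r V := rfl
  have hrV : r < V := Nat.mod_lt _ hV
  have hsum : (pvCs b r V).sum = K := by
    rw [pvCs_sum, Nat.min_eq_left (le_of_lt hrV), hb, hr, Nat.mul_comm]
    exact Nat.div_add_mod K V
  simp only [hfd, hmd, hrange, List.foldl_map, Int.toNat_natCast]
  -- pointwise clean-up of both loop bodies
  have hcond : ∀ j : ℕ, ((0 : Int) + (j : ℕ) < (r : Int)) ↔ j < r := by
    intro j; omega
  have hcInt : ∀ j : ℕ, (b : Int) + (if ((0 : Int) + (j : ℕ)) < (r : Int) then 1 else 0) = ((g j : ℕ) : Int) := by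
    intro j
    by_cases hj : j < r
    · rw [if_pos ((hcond j).mpr hj), hg]; simp [hj]
    · rw [if_neg (fun h => hj ((hcond j).mp h)), hg]; simp [hj]
  have hbodyA : (fun (d : Int) (j : ℕ) =>
        d * ((Nat.factorial ((b : Int) + if ((0 : Int) + (j : ℕ)) < (r : Int) then 1 else 0).toNat : ℕ) : Int))
      = fun (d : Int) (j : ℕ) => d * ((Nat.factorial (g j) : ℕ) : Int) := by
    funext d j
    rw [hcInt j, Int.toNat_natCast]
  have hbodyB : (fun (st : Int × Int) (j : ℕ) =>
        (st.1 - ((b : Int) + if ((0 : Int) + (j : ℕ)) < (r : Int) then 1 else 0),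
         st.2 * ((Nat.choose st.1.toNat ((b : Int) + if ((0 : Int) + (j : ℕ)) < (r : Int) then 1 else 0).toNat : ℕ) : Int)))
      = fun (st : Int × Int) (j : ℕ) =>
        (st.1 - ((g j : ℕ) : Int), st.2 * ((Nat.choose st.1.toNat (g j) : ℕ) : Int)) := by
    funext st j
    rw [hcInt j, Int.toNat_natCast]
  rw [hbodyA, hbodyB, pvFoldlMulCast (fun j => (g j).factorial) (List.range V) 1,
    pvBfold g (List.range V) K _ (by rw [hcs, hsum])]
  have hmapfact : (List.range V).map (fun j => (g j).factorial) = (pvCs b r V).map Nat.factorial := by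
    rw [← hcs, List.map_map]; rfl
  rw [hmapfact, hcs, hsum]
  -- both sides are now C * (exact division) vs C * (binomial product)
  set P : ℕ := ((pvCs b r V).map Nat.factorial).prod with hP
  have hfact : K.factorial = pvBp K (pvCs b r V) * P := by
    rw [hP, ← hsum, pvBp_mul_prodFact]
  rw [one_mul, hfact]
  have : PySem.Int.floordiv ((pvBp K (pvCs b r V) * P : ℕ) : Int) ((P : ℕ) : Int)
      = ((pvBp K (pvCs b r V) : ℕ) : Int) := by
    rw [PySem.Int.floordiv_natCast, Nat.mul_div_cancel _ (pvProdFactPos _)]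
  rw [this]
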